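-- pv_equiv track=rewrite | github.com/yrribeiro/undergraduation-usage | evolutionary-computing/best_2d_molecule.py | get_all_atoms_position
-- ===== SOURCE A (Python) =====
-- directions = {'U': lambda x,y: (x-1,y), # up
--                 'D': lambda x,y: (x+1,y), # down
--                 'L': lambda x,y: (x,y-1), # left
--                 'R': lambda x,y: (x,y+1)} # right
--
-- def get_all_atoms_position(s, child_info):
--     '''
--     Takes the list of directions and uses it to generate the (x, y) coordinates for each atom in the structure
--     '''
--     positions = {}
--     first, dir_instructions = child_info
--
--     for idx, d in enumerate(dir_instructions):
--         if idx == 0: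
--             x_pos, y_pos = first[0][0], first[0][1]
--             positions.update([first])
--         else:
--             x_pos, y_pos = directions[d](x_pos, y_pos)
--             positions[(x_pos, y_pos)] = s[idx]
--     return positions
-- ===== SOURCE B (Python) =====
-- def get_all_atoms_position(s, child_info):
--     '''
--     Takes the list of directions and uses it to generate the (x, y) coordinates for each atom in the structure
--     '''
--     first, dir_instructions = child_info
--     (x0, y0), label0 = first
--     # closed form: the coordinate of atom i is the start plus the net displacement,
--     # i.e. signed counts of each direction letter among dir_instructions[1:i+1]
--     return {
--         (x0 + dir_instructions[1:i + 1].count('D') - dir_instructions[1:i + 1].count('U'),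
--          y0 + dir_instructions[1:i + 1].count('R') - dir_instructions[1:i + 1].count('L')):
--             (label0 if i == 0 else s[i])
--         for i in range(len(dir_instructions))
--     }
-- ===== Notes on version B (the rewrite author's own statement) =====
-- stated objective: alternative
-- what changed: B drops A's stateful walk (carrying x_pos/y_pos and inserting into the dict step by step) and instead computes each atom's coordinate independently by a closed form - start plus signed counts of the direction letters in dir_instructions[1:i+1] - building the whole dict as one comprehension.
-- outside the precondition, e.g. on get_all_atoms_position(['a', 'b'], (((0, 0), 'c'), ['R', 'Z'])): A raises KeyError, B returns {(0, 0): 'b'}; on get_all_atoms_position([], (((0, 0), 'c'), ['R', 'R'])): A raises IndexError, B raises IndexError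
import Mathlib
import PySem

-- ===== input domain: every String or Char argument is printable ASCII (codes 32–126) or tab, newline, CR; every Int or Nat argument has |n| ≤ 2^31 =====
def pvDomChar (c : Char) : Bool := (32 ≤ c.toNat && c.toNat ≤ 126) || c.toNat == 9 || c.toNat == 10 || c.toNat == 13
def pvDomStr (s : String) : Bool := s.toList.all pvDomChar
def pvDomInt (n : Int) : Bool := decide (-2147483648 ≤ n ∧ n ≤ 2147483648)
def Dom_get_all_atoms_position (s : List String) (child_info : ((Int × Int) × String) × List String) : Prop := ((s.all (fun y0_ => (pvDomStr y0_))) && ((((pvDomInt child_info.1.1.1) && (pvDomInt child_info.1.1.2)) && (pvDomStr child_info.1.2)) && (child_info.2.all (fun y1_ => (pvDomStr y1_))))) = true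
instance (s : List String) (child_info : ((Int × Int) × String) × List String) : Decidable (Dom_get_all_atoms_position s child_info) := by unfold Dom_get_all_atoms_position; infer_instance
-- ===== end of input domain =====

-- B replaces A's stateful walk (carrying x_pos, y_pos and inserting into the dict per step)
-- by a per-index closed form: atom i's coordinate is the start plus the signed counts of
-- each direction letter in dir_instructions[1:i+1], built as one dict comprehension;
-- an alternative decomposition, not claimed faster.

-- ===== PORT A =====
-- the module-level 'directions' dict of lambdas
def pvDirections : PySem.Dict String (Int → Int → (Int × Int)) :=
  PySem.Dict.ofList [("U", fun x y => (x - 1, y)), ("D", fun x y => (x + 1, y)),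
                     ("L", fun x y => (x, y - 1)), ("R", fun x y => (x, y + 1))]

-- A's loop body; state: none = a raised exception (KeyError/IndexError; excluded by Pre_),
-- some (x_pos, y_pos, positions) otherwise.
def pvLoopBody (s : List String) (first : (Int × Int) × String)
    (acc : Option (Int × Int × PySem.Dict (Int × Int) String)) (p : Int × String) :
    Option (Int × Int × PySem.Dict (Int × Int) String) :=
  match acc with
  | none => none
  | some (x_pos, y_pos, positions) =>
    if p.1 = 0 then
      some (first.1.1, first.1.2, positions.insert first.1 first.2)
    else
      match pvDirections.get? p.2 with
      | none => none
      | some f =>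
        let q := f x_pos y_pos
        match PySem.List.pyGet? s p.1 with
        | none => none
        | some lbl => some (q.1, q.2, positions.insert q lbl)

-- the initial (0, 0) position is never read: index 0 always sets it
def get_all_atoms_position (s : List String) (child_info : ((Int × Int) × String) × List String) : List (Int × Int × String) :=
  let first := child_info.1
  let dir_instructions := child_info.2
  let res := (PySem.List.enumerate dir_instructions 0).foldl (pvLoopBody s first)
    (some (0, 0, PySem.Dict.empty))
  match res with
  | none => []
  | some (_, _, positions) => positions.items.map (fun q => (q.1.1, q.1.2, q.2))

-- ===== PORT B =====
-- one comprehension entry: key = closed-form coordinate (signed letter counts over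
-- dirs[1:i+1]), value = first's label at i = 0, else s[i] (none = IndexError, outside Pre_)
def pvEntry (s : List String) (dirs : List String) (x0 y0 : Int) (label0 : String)
    (i : Int) : Option ((Int × Int) × String) :=
  (if i = 0 then some label0 else PySem.List.pyGet? s i).map (fun lbl =>
    ((x0 + (PySem.List.count (PySem.List.slice dirs (some 1) (some (i + 1))) "D" : Int)
        - (PySem.List.count (PySem.List.slice dirs (some 1) (some (i + 1))) "U" : Int),
      y0 + (PySem.List.count (PySem.List.slice dirs (some 1) (some (i + 1))) "R" : Int)
        - (PySem.List.count (PySem.List.slice dirs (some 1) (some (i + 1))) "L" : Int)), lbl))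

def get_all_atoms_position_alt (s : List String) (child_info : ((Int × Int) × String) × List String) : List (Int × Int × String) :=
  let first := child_info.1
  let dirs := child_info.2
  match (PySem.List.pyRange 0 (dirs.length : Int) 1).mapM
      (pvEntry s dirs first.1.1 first.1.2 first.2) with
  | none => []
  | some pairs => (PySem.Dict.ofList pairs).items.map (fun q => (q.1.1, q.1.2, q.2))

-- ===== PRECONDITION & SPEC =====
-- Pre_ excludes exactly the inputs where A raises: a KeyError when any direction after the
-- first is not one of U/D/L/R, and an IndexError when s is shorter than dir_instructions
-- (only reached when at least two instructions exist).
def Pre_get_all_atoms_position (s : List String) (child_info : ((Int × Int) × String) × List String) : Prop :=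
  (∀ d ∈ child_info.2.drop 1, d = "U" ∨ d = "D" ∨ d = "L" ∨ d = "R") ∧
  (2 ≤ child_info.2.length → child_info.2.length ≤ s.length)
instance (s : List String) (child_info : ((Int × Int) × String) × List String) : Decidable (Pre_get_all_atoms_position s child_info) := by unfold Pre_get_all_atoms_position; infer_instance

def pvWitness_get_all_atoms_position : List String × (((Int × Int) × String) × List String) :=
  (["a", "b"], (((0, 0), "C"), ["X", "R"]))

def Spec_get_all_atoms_position (s : List String) (child_info : ((Int × Int) × String) × List String) (out : List (Int × Int × String)) : Prop := out = get_all_atoms_position_alt s child_info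
instance (s : List String) (child_info : ((Int × Int) × String) × List String) (out : List (Int × Int × String)) : Decidable (Spec_get_all_atoms_position s child_info out) := by unfold Spec_get_all_atoms_position; infer_instance

-- ===== CLAIM (what is proved, stated in full; the proofs are below) =====
def Claim_equal_get_all_atoms_position : Prop := ∀ (s : List String) (child_info : ((Int × Int) × String) × List String), Dom_get_all_atoms_position s child_info → Pre_get_all_atoms_position s child_info → Spec_get_all_atoms_position s child_info (get_all_atoms_position s child_info)

-- ===== LEMMAS AND PROOFS =====

-- net displacement of a run of direction letters (B's closed form, as signed counts)
def pvNet (l : List String) : Int × Int :=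
  ((l.count "D" : Int) - (l.count "U" : Int), (l.count "R" : Int) - (l.count "L" : Int))

-- one step and the whole walk (proof-side description of A's loop)
def pvStep (d : String) (p : Int × Int) : Int × Int :=
  (p.1 + (pvNet [d]).1, p.2 + (pvNet [d]).2)

def pvWalk (p : Int × Int) : List String → List (Int × Int)
  | [] => []
  | d :: t => pvStep d p :: pvWalk (pvStep d p) t

def pvEnd (p : Int × Int) : List String → Int × Int
  | [] => p
  | d :: t => pvEnd (pvStep d p) t

theorem pvNet_cons (d : String) (l : List String) :
    pvNet (d :: l) = ((pvNet [d]).1 + (pvNet l).1, (pvNet [d]).2 + (pvNet l).2) := by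
  simp [pvNet, List.count_cons, Prod.ext_iff]
  constructor <;> split_ifs <;> push_cast <;> ring

theorem pvDir_step (d : String) (hd : d = "U" ∨ d = "D" ∨ d = "L" ∨ d = "R")
    (x y : Int) :
    ∃ f, pvDirections.get? d = some f ∧ f x y = pvStep d (x, y) := by
  rcases hd with h | h | h | h <;> subst h <;>
    exact ⟨_, rfl, by simp [pvStep, pvNet]; try omega⟩

-- A's loop over the enumerated tail, from index k ≥ 1
theorem pvA_fold (s : List String) (first : (Int × Int) × String)
    (rest : List String) (k : Nat) (hk : 1 ≤ k) (x y : Int)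
    (D : PySem.Dict (Int × Int) String)
    (hall : ∀ d ∈ rest, d = "U" ∨ d = "D" ∨ d = "L" ∨ d = "R")
    (hs : k + rest.length ≤ s.length) :
    (PySem.List.enumerate rest (k : Int)).foldl (pvLoopBody s first) (some (x, y, D))
      = some ((pvEnd (x, y) rest).1, (pvEnd (x, y) rest).2,
          ((pvWalk (x, y) rest).zip ((s.drop k).take rest.length)).foldl
            (fun d p => d.insert p.1 p.2) D) := by
  induction rest generalizing k x y D with
  | nil => simp [pvWalk, pvEnd, PySem.List.enumerate]
  | cons d t ih =>
    obtain ⟨f, hf, hfxy⟩ := pvDir_step d (hall d (by simp)) x y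
    have hklt : k < s.length := by simp at hs; omega
    have hget : PySem.List.pyGet? s (k : Int) = some s[k] := by
      simp [PySem.List.pyGet?_natCast, List.getElem?_eq_getElem hklt]
    have hk0' : ¬ (k = 0) := by omega
    have hdrop : s.drop k = s[k] :: s.drop (k + 1) := List.drop_eq_getElem_cons hklt
    have hstep : pvLoopBody s first (some (x, y, D)) ((k : Int), d)
        = some ((pvStep d (x, y)).1, (pvStep d (x, y)).2, D.insert (pvStep d (x, y)) s[k]) := by
      simp [pvLoopBody, hk0', hf, hget, hfxy]
    have hcast : (k : Int) + 1 = ((k + 1 : Nat) : Int) := by push_cast; ring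
    rw [PySem.List.enumerate_cons, List.foldl_cons, hstep, hcast,
      ih (k + 1) (by omega) (pvStep d (x, y)).1 (pvStep d (x, y)).2 _
        (fun e he => hall e (by simp [he])) (by simp at hs ⊢; omega)]
    simp only [pvWalk, pvEnd, hdrop, List.length_cons, List.take_succ_cons,
      List.zip_cons_cons, List.foldl_cons]

-- the walk, element by element, equals B's closed form over prefixes
theorem pvWalk_eq_map (rest : List String) (p : Int × Int) :
    pvWalk p rest = (List.range rest.length).map
      (fun j => (p.1 + (pvNet (rest.take (j + 1))).1, p.2 + (pvNet (rest.take (j + 1))).2)) := by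
  induction rest generalizing p with
  | nil => rfl
  | cons d t ih =>
    simp only [pvWalk, List.length_cons, List.range_succ_eq_map, List.map_cons,
      List.map_map, ih (pvStep d p)]
    refine List.cons_eq_cons.mpr ⟨?_, List.map_congr_left (fun j hj => ?_)⟩
    · rw [List.take_succ_cons, List.take_zero]; rfl
    · simp only [Function.comp_apply, Nat.succ_eq_add_one, List.take_succ_cons]
      rw [pvNet_cons]
      simp only [pvStep, Prod.mk.injEq]
      exact ⟨by ring, by ring⟩

-- evaluating an Option-valued comprehension whose entries all succeed
theorem mapM_map_eq_map {α ι β : Type} (l : List α) (c : α → ι) (f : ι → Option β)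
    (g : α → β) (h : ∀ x ∈ l, f (c x) = some (g x)) :
    (l.map c).mapM f = some (l.map g) := by
  induction l with
  | nil => rfl
  | cons a t ih =>
    rw [List.map_cons, List.mapM_cons, h a (by simp), ih (fun x hx => h x (by simp [hx]))]
    rfl

-- the entry at a natural index k, under Pre_'s length bound, is B's closed form
theorem pvEntry_eval (s : List String) (d0 : String) (rest : List String)
    (x0 y0 : Int) (label0 : String) (k : Nat) (hk : k = 0 ∨ k < s.length) :
    pvEntry s (d0 :: rest) x0 y0 label0 (k : Int) =
      some ((x0 + (pvNet (rest.take k)).1, y0 + (pvNet (rest.take k)).2),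
        if k = 0 then label0 else s.getD k "") := by
  by_cases hk0 : k = 0
  · subst hk0
    simp [pvEntry, pvNet, PySem.List.count_eq]
  · have hslice : PySem.List.slice (d0 :: rest) (some 1) (some ((k : Int) + 1))
        = rest.take k := by
      rw [show (k : Int) + 1 = ((k + 1 : Nat) : Int) from by push_cast; ring,
        show (1 : Int) = ((1 : Nat) : Int) from by norm_num, PySem.List.slice_natCast]
      simp
    have hlt : k < s.length := by rcases hk with h | h; exact absurd h hk0; exact h
    have hget : PySem.List.pyGet? s (k : Int) = some (s[k]'hlt) := by
      simp [PySem.List.pyGet?_natCast, List.getElem?_eq_getElem hlt]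
    simp [pvEntry, hslice, pvNet, PySem.List.count_eq, hget, hk0]
    refine ⟨⟨by ring, by ring⟩, by simp [List.getElem?_eq_getElem hlt]⟩

theorem pv_main (s : List String) (child_info : ((Int × Int) × String) × List String)
    (hpre : Pre_get_all_atoms_position s child_info) :
    get_all_atoms_position s child_info = get_all_atoms_position_alt s child_info := by
  obtain ⟨first, dirs⟩ := child_info
  obtain ⟨hall, hlen⟩ := hpre
  cases dirs with
  | nil => rfl
  | cons d0 rest =>
    simp only [List.drop_succ_cons, List.drop_zero] at hall
    have hsk : 1 + rest.length ≤ s.length ∨ rest = [] := by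
      rcases rest with _ | ⟨r, rs⟩
      · right; rfl
      · left
        have := hlen (by simp only [List.length_cons]; omega)
        simp only [List.length_cons] at this ⊢
        omega
    -- B's side: the range, then the comprehension's entries
    have hrange : PySem.List.pyRange 0 (((d0 :: rest).length : Nat) : Int) 1
        = List.map (Nat.cast : Nat → Int) (List.range (rest.length + 1)) := by
      rw [PySem.List.pyRange_one]
      simp only [Int.sub_zero, Int.toNat_natCast, List.length_cons, zero_add]
    have hmem : ∀ k ∈ List.range (rest.length + 1), k = 0 ∨ k < s.length := by
      intro k hkmem
      have hklt := List.mem_range.mp hkmem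
      rcases hsk with h | h
      · rcases Nat.eq_zero_or_pos k with h0 | h0
        · exact Or.inl h0
        · right; omega
      · subst h
        left
        simp at hklt
        omega
    have hmapM : (PySem.List.pyRange 0 (((d0 :: rest).length : Nat) : Int) 1).mapM
        (pvEntry s (d0 :: rest) first.1.1 first.1.2 first.2)
        = some ((List.range (rest.length + 1)).map (fun k =>
            ((first.1.1 + (pvNet (rest.take k)).1, first.1.2 + (pvNet (rest.take k)).2),
             if k = 0 then first.2 else s.getD k ""))) := by
      rw [hrange]
      exact mapM_map_eq_map _ _ _ _ (fun k hkmem =>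
        pvEntry_eval s d0 rest first.1.1 first.1.2 first.2 k (hmem k hkmem))
    -- A's side: the stateful walk
    simp only [get_all_atoms_position, get_all_atoms_position_alt,
      PySem.List.enumerate_cons, List.foldl_cons, hmapM]
    have hstep0 : pvLoopBody s first (some (0, 0, PySem.Dict.empty)) (0, d0)
        = some (first.1.1, first.1.2, PySem.Dict.empty.insert first.1 first.2) := by
      simp [pvLoopBody]
    have hcast1 : (0 : Int) + 1 = ((1 : Nat) : Int) := by norm_num
    -- the two pair lists coincide
    have hlists : (first.1, first.2) :: (pvWalk (first.1.1, first.1.2) rest).zip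
          ((s.drop 1).take rest.length)
        = (List.range (rest.length + 1)).map (fun k =>
            ((first.1.1 + (pvNet (rest.take k)).1, first.1.2 + (pvNet (rest.take k)).2),
             if k = 0 then first.2 else s.getD k "")) := by
      rw [List.range_succ_eq_map, List.map_cons, List.map_map]
      congr 1
      · simp [pvNet]
      · rcases hsk with hs1 | hs1
        · apply List.ext_getElem
          · simp [pvWalk_eq_map]
            omega
          · intro j h1 h2
            have hj : j < rest.length := by
              simp [pvWalk_eq_map] at h1
              omega
            have hjs : j + 1 < s.length := by omega
            simp [List.getElem_zip, pvWalk_eq_map, List.getElem?_eq_getElem hjs]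
        · subst hs1
          simp [pvWalk]
    rcases hsk with hs1 | hs1
    · rw [hstep0, hcast1, pvA_fold s first rest 1 (by omega) first.1.1 first.1.2 _ hall
        (by omega)]
      rw [show PySem.Dict.empty.insert first.1 first.2
            = PySem.Dict.ofList [(first.1, first.2)] from rfl]
      have hfold : ((pvWalk (first.1.1, first.1.2) rest).zip ((s.drop 1).take rest.length)).foldl
            (fun d p => d.insert p.1 p.2) (PySem.Dict.ofList [(first.1, first.2)])
          = PySem.Dict.ofList ((first.1, first.2) ::
              (pvWalk (first.1.1, first.1.2) rest).zip ((s.drop 1).take rest.length)) := by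
        simp [PySem.Dict.ofList, PySem.Dict.update]
      rw [hfold, hlists]
    · subst hs1
      rw [hstep0, hcast1]
      simp only [PySem.List.enumerate, List.foldl_nil]
      rw [show PySem.Dict.empty.insert first.1 first.2
            = PySem.Dict.ofList [(first.1, first.2)] from rfl]
      have hnil : [(first.1, first.2)] = (first.1, first.2) ::
            (pvWalk (first.1.1, first.1.2) ([] : List String)).zip
              ((s.drop 1).take ([] : List String).length) := by
        simp [pvWalk]
      rw [hnil, hlists]

-- ===== VERDICT (by name: the statement is the Claim_ definition above) =====
theorem get_all_atoms_position_spec : Claim_equal_get_all_atoms_position := by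
  intro s child_info _ hpre
  unfold Spec_get_all_atoms_position
  exact pv_main s child_info hpre
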